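-- pv_equiv track=rewrite | github.com/Thosedarnmonkeys/AdventOfCode2025 | timmo/day08.py | connect_pairs
-- ===== SOURCE A (Python) =====
-- def connect_pairs(pairs: list[tuple[int, int]], total: int) -> dict[int, set[int]]:
--     """Connect pairs of boxes to form circuits."""
--     state = {i: i for i in range(total)}
--     circuits = {i: {i} for i in range(total)}
--
--     for box1, box2 in pairs:
--         circuit_idx1, circuit_idx2 = state[box1], state[box2]
--         if circuit_idx1 == circuit_idx2:
--             continue
--
--         circuit1, circuit2 = circuits[circuit_idx1], circuits[circuit_idx2]
--         circuit1.update(circuit2)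
--         for box in circuit2:
--             state[box] = circuit_idx1
--         circuits.pop(circuit_idx2)
--
--     return circuits
-- ===== SOURCE B (Python) =====
-- def connect_pairs(pairs: list[tuple[int, int]], total: int) -> dict[int, set[int]]:
--     """Connect pairs of boxes to form circuits (union-find: parent forest instead of
--     eagerly relabelling every member on each merge)."""
--     parent = {i: i for i in range(total)}
--     circuits = {i: {i} for i in range(total)}
--
--     def find(x: int) -> int:
--         while parent[x] != x:
--             x = parent[x]
--         return x
--
--     for box1, box2 in pairs:
--         root1, root2 = find(box1), find(box2)
--         if root1 == root2:
--             continue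
--         circuits[root1] |= circuits[root2]
--         del circuits[root2]
--         parent[root2] = root1
--
--     return circuits
-- ===== Notes on version B (the rewrite author's own statement) =====
-- stated objective: alternative
-- what changed: Replaces A's eager relabelling of every member of the absorbed circuit on each merge (plus the per-box state dict) by a union-find parent forest whose roots are found by chasing parent pointers, keeping box1's root as representative; the circuits dict itself is maintained the same way, so the returned value is identical.
import Mathlib
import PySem

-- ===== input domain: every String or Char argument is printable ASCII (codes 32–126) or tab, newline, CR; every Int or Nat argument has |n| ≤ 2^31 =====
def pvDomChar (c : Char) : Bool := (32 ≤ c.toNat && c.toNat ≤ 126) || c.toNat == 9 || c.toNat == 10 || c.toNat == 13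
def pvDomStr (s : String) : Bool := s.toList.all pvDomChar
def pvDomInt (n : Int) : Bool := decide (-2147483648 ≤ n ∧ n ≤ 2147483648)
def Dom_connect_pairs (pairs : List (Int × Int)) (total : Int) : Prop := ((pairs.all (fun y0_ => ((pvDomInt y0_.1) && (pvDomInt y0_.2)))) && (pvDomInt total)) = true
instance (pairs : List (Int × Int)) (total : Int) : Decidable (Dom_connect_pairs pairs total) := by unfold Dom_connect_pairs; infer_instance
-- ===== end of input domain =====

-- B replaces A's eager whole-circuit relabelling on every merge by a union-find parent
-- forest (roots looked up by chasing parents), keeping box1's root as representative.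
-- The returned circuit sets and their dict order are proved identical.

-- ===== PORT A =====
-- one iteration of A's 'for box1, box2 in pairs' loop over the state (state, circuits)
def connectStepA (sc : PySem.Dict Int Int × PySem.Dict Int (PySem.Set Int))
    (bp : Int × Int) : PySem.Dict Int Int × PySem.Dict Int (PySem.Set Int) :=
  -- state[box1] / state[box2]: KeyError (box outside range(total)) is excluded by Pre_,
  -- so the getD default is never consulted on admitted inputs
  let ci1 := sc.1.getD bp.1 bp.1
  let ci2 := sc.1.getD bp.2 bp.2
  if ci1 = ci2 then sc
  else
    let c1 := sc.2.getD ci1 []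
    let c2 := sc.2.getD ci2 []
    -- circuit1.update(circuit2)  (in-place: overwrite keeps the key's position)
    let cir := sc.2.insert ci1 (PySem.Set.update c1 c2)
    -- for box in circuit2: state[box] = circuit_idx1
    let st := c2.foldl (fun st b => st.insert b ci1) sc.1
    -- circuits.pop(circuit_idx2)
    (st, cir.erase ci2)

def connect_pairs (pairs : List (Int × Int)) (total : Int) : List (Int × List Int) :=
  let state := (PySem.List.pyRange 0 total 1).foldl (fun d i => d.insert i i) PySem.Dict.empty
  let circuits := (PySem.List.pyRange 0 total 1).foldl
    (fun d i => d.insert i (PySem.Set.ofList [i])) PySem.Dict.empty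
  ((pairs.foldl connectStepA (state, circuits)).2).items

-- ===== PORT B =====
-- 'while parent[x] != x: x = parent[x]' — fuel only makes the loop total; on admitted
-- inputs parent chains are shorter than pairs.length + 1, so the fuel never runs out
def pvFind (fuel : Nat) (parent : PySem.Dict Int Int) (x : Int) : Int :=
  match fuel with
  | 0 => x
  | f + 1 =>
    let px := parent.getD x x
    if px = x then x else pvFind f parent px

-- one iteration of B's loop over the state (parent, circuits)
def unionStep (fuel : Nat) (pc : PySem.Dict Int Int × PySem.Dict Int (PySem.Set Int))
    (bp : Int × Int) : PySem.Dict Int Int × PySem.Dict Int (PySem.Set Int) :=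
  let r1 := pvFind fuel pc.1 bp.1
  let r2 := pvFind fuel pc.1 bp.2
  if r1 = r2 then pc
  else
    -- circuits[root1] |= circuits[root2]; del circuits[root2]
    let cir := (pc.2.insert r1 (PySem.Set.union (pc.2.getD r1 []) (pc.2.getD r2 []))).erase r2
    -- parent[root2] = root1
    (pc.1.insert r2 r1, cir)

def connect_pairs_alt (pairs : List (Int × Int)) (total : Int) : List (Int × List Int) :=
  let parent := (PySem.List.pyRange 0 total 1).foldl (fun d i => d.insert i i) PySem.Dict.empty
  let circuits := (PySem.List.pyRange 0 total 1).foldl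
    (fun d i => d.insert i (PySem.Set.ofList [i])) PySem.Dict.empty
  ((pairs.foldl (unionStep (pairs.length + 1)) (parent, circuits)).2).items

-- ===== PRECONDITION & SPEC =====
-- Pre_ excludes exactly the inputs on which A raises KeyError: a pair member outside range(total)
def Pre_connect_pairs (pairs : List (Int × Int)) (total : Int) : Prop :=
  ∀ p ∈ pairs, 0 ≤ p.1 ∧ p.1 < total ∧ 0 ≤ p.2 ∧ p.2 < total
instance (pairs : List (Int × Int)) (total : Int) : Decidable (Pre_connect_pairs pairs total) := by
  unfold Pre_connect_pairs; infer_instance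
def pvWitness_connect_pairs : (List (Int × Int)) × Int := ([(0, 1), (3, 2), (1, 3)], 5)

def Spec_connect_pairs (pairs : List (Int × Int)) (total : Int) (out : List (Int × List Int)) : Prop := out = connect_pairs_alt pairs total
instance (pairs : List (Int × Int)) (total : Int) (out : List (Int × List Int)) : Decidable (Spec_connect_pairs pairs total out) := by unfold Spec_connect_pairs; infer_instance

-- ===== CLAIM (what is proved, stated in full; the proofs are below) =====
def Claim_equal_connect_pairs : Prop := ∀ (pairs : List (Int × Int)) (total : Int), Dom_connect_pairs pairs total → Pre_connect_pairs pairs total → Spec_connect_pairs pairs total (connect_pairs pairs total)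

-- ===== LEMMAS AND PROOFS =====

-- 'PvReach p x r n': starting at x and chasing parents n times reaches the root r
inductive PvReach (p : PySem.Dict Int Int) : Int → Int → Nat → Prop
  | refl (x : Int) : p.getD x x = x → PvReach p x x 0
  | step (x r : Int) (n : Nat) : p.getD x x ≠ x → PvReach p (p.getD x x) r n → PvReach p x r (n + 1)

theorem pvReach_root {p : PySem.Dict Int Int} {x r : Int} {n : Nat}
    (h : PvReach p x r n) : p.getD r r = r := by
  induction h with
  | refl x hx => exact hx
  | step x r n hx _ ih => exact ih

theorem pvReach_start_root {p : PySem.Dict Int Int} {x r : Int} {n : Nat}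
    (h : PvReach p x r n) (hx : p.getD x x = x) : r = x := by
  cases h with
  | refl _ _ => rfl
  | step _ _ _ hne _ => exact absurd hx hne

theorem pvFind_eq {p : PySem.Dict Int Int} {x r : Int} {n : Nat}
    (h : PvReach p x r n) {fuel : Nat} (hf : n < fuel) : pvFind fuel p x = r := by
  induction h generalizing fuel with
  | refl x hx =>
    cases fuel with
    | zero => omega
    | succ f => simp [pvFind, hx]
  | step x r n hx _ ih =>
    cases fuel with
    | zero => omega
    | succ f => simp only [pvFind, if_neg hx]; exact ih (by omega)

theorem pvReach_insert_of_ne {p : PySem.Dict Int Int} {x r r1 r2 : Int} {n : Nat}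
    (h : PvReach p x r n) (h2 : p.getD r2 r2 = r2) (hne : r ≠ r2) :
    PvReach (p.insert r2 r1) x r n := by
  induction h with
  | refl x hx =>
    refine PvReach.refl x ?_
    rw [PySem.Dict.getD_insert, if_neg hne, hx]
  | step x r n hx hr ih =>
    have hxne : x ≠ r2 := fun he => hx (by rw [he, h2])
    refine PvReach.step x r n ?_ ?_
    · rw [PySem.Dict.getD_insert, if_neg hxne]; exact hx
    · rw [PySem.Dict.getD_insert, if_neg hxne]; exact ih hne

theorem pvReach_insert_of_eq {p : PySem.Dict Int Int} {x r1 r2 : Int} {n : Nat}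
    (h : PvReach p x r2 n) (h1 : p.getD r1 r1 = r1)
    (hne : r1 ≠ r2) : PvReach (p.insert r2 r1) x r1 (n + 1) := by
  induction h with
  | refl x hx =>
    refine PvReach.step x r1 0 ?_ ?_
    · rw [PySem.Dict.getD_insert, if_pos rfl]
      exact fun he => hne he
    · rw [PySem.Dict.getD_insert, if_pos rfl]
      exact PvReach.refl r1 (by rw [PySem.Dict.getD_insert, if_neg hne, h1])
  | step x r n hx hr ih =>
    have hxne : x ≠ r := fun he => hx (by rw [he]; exact pvReach_root hr)
    refine PvReach.step x r1 (n + 1) ?_ ?_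
    · rw [PySem.Dict.getD_insert, if_neg hxne]; exact hx
    · rw [PySem.Dict.getD_insert, if_neg hxne]; exact ih hne

-- the relabelling loop 'for box in c2: state[box] = v'
theorem getD_relabel (l : List Int) (st : PySem.Dict Int Int) (v x : Int) :
    (l.foldl (fun st b => st.insert b v) st).getD x x
      = if x ∈ l then v else st.getD x x := by
  induction l generalizing st with
  | nil => simp
  | cons a l ih =>
    simp only [List.foldl_cons, ih, List.mem_cons, PySem.Dict.getD_insert]
    by_cases hxl : x ∈ l
    · simp [hxl]
    · by_cases hxa : x = a <;> simp [hxl, hxa]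

theorem getD_id_init (l : List Int) (d : PySem.Dict Int Int)
    (hd : ∀ x, d.getD x x = x) (x : Int) :
    (l.foldl (fun d i => d.insert i i) d).getD x x = x := by
  induction l generalizing d with
  | nil => exact hd x
  | cons a l ih =>
    refine ih _ (fun y => ?_)
    rw [PySem.Dict.getD_insert]
    by_cases hy : y = a <;> simp [hy, hd]

theorem pv_contains_erase {ν : Type} (d : PySem.Dict Int ν) (k k' : Int) :
    (d.erase k).contains k' = (!(k' == k) && d.contains k') := by
  simp only [PySem.Dict.erase, PySem.Dict.contains]
  induction d.items with
  | nil => simp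
  | cons p rest ih =>
    simp only [List.filter_cons]
    by_cases h2 : p.1 = k
    · have hb : (!(p.1 == k)) = false := by simp [h2]
      rw [hb]
      simp only [if_neg (by simp : ¬ false = true), ih, List.any_cons]
      by_cases h3 : k' = k
      · simp [h3]
      · rw [show (p.1 == k') = false from beq_eq_false_iff_ne.mpr (h2 ▸ Ne.symm h3)]
        simp
    · have hb : (!(p.1 == k)) = true := by simp [h2]
      rw [hb, if_pos rfl]
      simp only [List.any_cons, ih]
      by_cases h1 : p.1 = k'
      · rw [show (p.1 == k') = true from beq_iff_eq.mpr h1]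
        have h3 : ¬ k' = k := fun he => h2 (h1.trans he)
        rw [show (!(k' == k)) = true by simp [h3]]
        simp
      · rw [show (p.1 == k') = false from beq_eq_false_iff_ne.mpr h1]
        simp

theorem pv_find?_filter_ne {ν : Type} (l : List (Int × ν)) (k k' : Int) (h : k' ≠ k) :
    List.find? (fun p => p.1 == k') (l.filter (fun p => !(p.1 == k)))
      = List.find? (fun p => p.1 == k') l := by
  induction l with
  | nil => rfl
  | cons p rest ih =>
    simp only [List.filter_cons]
    by_cases h2 : p.1 = k
    · rw [show (!(p.1 == k)) = false by simp [h2]]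
      simp only [if_neg (by simp : ¬ false = true), ih, List.find?_cons]
      rw [show (p.1 == k') = false from beq_eq_false_iff_ne.mpr (h2 ▸ Ne.symm h)]
    · rw [show (!(p.1 == k)) = true by simp [h2], if_pos rfl]
      simp only [List.find?_cons, ih]

theorem pv_get?_erase {ν : Type} (d : PySem.Dict Int ν) (k k' : Int) :
    (d.erase k).get? k' = if k' = k then none else d.get? k' := by
  simp only [PySem.Dict.erase, PySem.Dict.get?]
  by_cases h3 : k' = k
  · subst h3
    rw [if_pos rfl, List.find?_eq_none.mpr, Option.map_none]
    intro p hp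
    have := (List.mem_filter.mp hp).2
    simpa using this
  · rw [if_neg h3, pv_find?_filter_ne _ _ _ h3]

theorem pv_nodup_keys_erase {ν : Type} (d : PySem.Dict Int ν) (k : Int)
    (h : d.keys.Nodup) : (d.erase k).keys.Nodup := by
  simp only [PySem.Dict.erase, PySem.Dict.keys] at *
  exact (List.Sublist.map Prod.fst List.filter_sublist).nodup h

-- the invariant tying A's (state, circuits) to B's parent forest, after some prefix
-- of the pairs (k bounds every parent-chain length)
def PvInv (stA : PySem.Dict Int Int) (cir : PySem.Dict Int (PySem.Set Int))
    (par : PySem.Dict Int Int) (total : Int) (k : Nat) : Prop :=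
  (∀ x : Int, ∃ n ≤ k, PvReach par x (stA.getD x x) n) ∧
  (∀ r : Int, cir.contains r = true ↔ (0 ≤ r ∧ r < total ∧ stA.getD r r = r)) ∧
  (∀ r c, cir.get? r = some c → ∀ x, x ∈ c ↔ stA.getD x x = r) ∧
  (∀ x, 0 ≤ x ∧ x < total → 0 ≤ stA.getD x x ∧ stA.getD x x < total)

theorem pv_state_idem {stA : PySem.Dict Int Int} {cir : PySem.Dict Int (PySem.Set Int)}
    {par : PySem.Dict Int Int} {total : Int} {k : Nat}
    (h : PvInv stA cir par total k) (x : Int) :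
    stA.getD (stA.getD x x) (stA.getD x x) = stA.getD x x := by
  obtain ⟨hre, -, -, -⟩ := h
  obtain ⟨n, -, hr⟩ := hre x
  have hroot := pvReach_root hr
  obtain ⟨m, -, hr2⟩ := hre (stA.getD x x)
  exact pvReach_start_root hr2 hroot

-- the main loop invariant lemma: the two folds produce the same circuits dict
theorem pv_loop (total : Int) (fuel : Nat) (rest : List (Int × Int))
    (stA : PySem.Dict Int Int) (cir : PySem.Dict Int (PySem.Set Int))
    (par : PySem.Dict Int Int) (k : Nat)
    (hinv : PvInv stA cir par total k)
    (hnd : cir.keys.Nodup)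
    (hfuel : k + rest.length < fuel)
    (hpre : ∀ p ∈ rest, 0 ≤ p.1 ∧ p.1 < total ∧ 0 ≤ p.2 ∧ p.2 < total) :
    (rest.foldl connectStepA (stA, cir)).2 = (rest.foldl (unionStep fuel) (par, cir)).2 := by
  induction rest generalizing stA cir par k with
  | nil => rfl
  | cons bp rest ih =>
    obtain ⟨b1, b2⟩ := bp
    obtain ⟨hb1l, hb1u, hb2l, hb2u⟩ := hpre (b1, b2) (by simp)
    obtain ⟨hre, hK, hC, hR⟩ := hinv
    have hfind1 : pvFind fuel par b1 = stA.getD b1 b1 := by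
      obtain ⟨n, hn, hrc⟩ := hre b1
      exact pvFind_eq hrc (by simp at hfuel; omega)
    have hfind2 : pvFind fuel par b2 = stA.getD b2 b2 := by
      obtain ⟨n, hn, hrc⟩ := hre b2
      exact pvFind_eq hrc (by simp at hfuel; omega)
    simp only [List.foldl_cons]
    by_cases hroots : stA.getD b1 b1 = stA.getD b2 b2
    · have hA : connectStepA (stA, cir) (b1, b2) = (stA, cir) := by
        simp only [connectStepA]; rw [if_pos hroots]
      have hB : unionStep fuel (par, cir) (b1, b2) = (par, cir) := by
        simp only [unionStep]; rw [hfind1, hfind2, if_pos hroots]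
      rw [hA, hB]
      exact ih stA cir par k ⟨hre, hK, hC, hR⟩ hnd (by simp at hfuel; omega)
        (fun p hp => hpre p (by simp [hp]))
    · -- the merge branch
      have hinv' : PvInv stA cir par total k := ⟨hre, hK, hC, hR⟩
      have h1root : stA.getD (stA.getD b1 b1) (stA.getD b1 b1) = stA.getD b1 b1 :=
        pv_state_idem hinv' b1
      have h2root : stA.getD (stA.getD b2 b2) (stA.getD b2 b2) = stA.getD b2 b2 :=
        pv_state_idem hinv' b2
      have hr1rng := hR b1 ⟨hb1l, hb1u⟩
      have hr2rng := hR b2 ⟨hb2l, hb2u⟩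
      have hpar1 : par.getD (stA.getD b1 b1) (stA.getD b1 b1) = stA.getD b1 b1 := by
        obtain ⟨n, hn, hrc⟩ := hre b1; exact pvReach_root hrc
      have hpar2 : par.getD (stA.getD b2 b2) (stA.getD b2 b2) = stA.getD b2 b2 := by
        obtain ⟨n, hn, hrc⟩ := hre b2; exact pvReach_root hrc
      -- abbreviate the two roots
      generalize hr1e : stA.getD b1 b1 = r1 at *
      generalize hr2e : stA.getD b2 b2 = r2 at *
      have hcont1 : cir.contains r1 = true := (hK r1).mpr ⟨hr1rng.1, hr1rng.2, h1root⟩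
      have hcont2 : cir.contains r2 = true := (hK r2).mpr ⟨hr2rng.1, hr2rng.2, h2root⟩
      obtain ⟨c1, hc1⟩ : ∃ c, cir.get? r1 = some c := by
        rw [PySem.Dict.contains_eq_isSome_get?] at hcont1
        exact Option.isSome_iff_exists.mp hcont1
      obtain ⟨c2, hc2⟩ : ∃ c, cir.get? r2 = some c := by
        rw [PySem.Dict.contains_eq_isSome_get?] at hcont2
        exact Option.isSome_iff_exists.mp hcont2
      have hgd1 : cir.getD r1 [] = c1 := PySem.Dict.getD_of_get?_eq_some _ _ hc1
      have hgd2 : cir.getD r2 [] = c2 := PySem.Dict.getD_of_get?_eq_some _ _ hc2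
      have hmem1 : ∀ x, x ∈ c1 ↔ stA.getD x x = r1 := hC r1 c1 hc1
      have hmem2 : ∀ x, x ∈ c2 ↔ stA.getD x x = r2 := hC r2 c2 hc2
      have hA : connectStepA (stA, cir) (b1, b2)
          = (c2.foldl (fun st b => st.insert b r1) stA,
             (cir.insert r1 (PySem.Set.update c1 c2)).erase r2) := by
        simp only [connectStepA]; rw [hr1e, hr2e, if_neg hroots, hgd1, hgd2]
      have hB : unionStep fuel (par, cir) (b1, b2)
          = (par.insert r2 r1,
             (cir.insert r1 (PySem.Set.update c1 c2)).erase r2) := by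
        simp only [unionStep]; rw [hfind1, hfind2, if_neg hroots, hgd1, hgd2]
        rfl
      rw [hA, hB]
      -- the new A-state after the relabelling loop
      have hst' : ∀ x, (c2.foldl (fun st b => st.insert b r1) stA).getD x x
          = if stA.getD x x = r2 then r1 else stA.getD x x := by
        intro x
        rw [getD_relabel]
        by_cases hx : x ∈ c2
        · rw [if_pos hx, if_pos ((hmem2 x).mp hx)]
        · rw [if_neg hx, if_neg (fun he => hx ((hmem2 x).mpr he))]
      refine ih _ _ _ (k + 1) ⟨?_, ?_, ?_, ?_⟩ ?_ (by simp at hfuel; omega)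
        (fun p hp => hpre p (by simp [hp]))
      · -- reach
        intro x
        obtain ⟨n, hn, hrc⟩ := hre x
        rw [hst' x]
        by_cases hx2 : stA.getD x x = r2
        · rw [if_pos hx2]
          rw [hx2] at hrc
          exact ⟨n + 1, by omega, pvReach_insert_of_eq hrc hpar1 hroots⟩
        · rw [if_neg hx2]
          exact ⟨n, by omega, pvReach_insert_of_ne hrc hpar2 hx2⟩
      · -- contains characterisation
        intro r
        rw [pv_contains_erase, PySem.Dict.contains_insert, hst' r]
        by_cases hrr2 : r = r2
        · subst hrr2
          simp only [beq_self_eq_true, Bool.not_true, Bool.false_and]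
          rw [if_pos h2root]
          constructor
          · intro h; exact absurd h (by simp)
          · rintro ⟨-, -, h⟩; exact absurd h hroots
        · rw [show (!(r == r2)) = true by simp [hrr2], Bool.true_and]
          by_cases hrr1 : r = r1
          · subst hrr1
            rw [if_neg (fun he => hrr2 (by rw [← h1root]; exact he))]
            simp only [beq_self_eq_true, Bool.true_or, true_iff]
            exact ⟨hr1rng.1, hr1rng.2, h1root⟩
          · rw [show (r == r1) = false from beq_eq_false_iff_ne.mpr hrr1, Bool.false_or]
            by_cases hsr : stA.getD r r = r2
            · rw [if_pos hsr]
              constructor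
              · intro h
                obtain ⟨-, -, hr⟩ := (hK r).mp h
                exact absurd (hr ▸ hsr) hrr2
              · rintro ⟨-, -, h⟩; exact absurd h.symm hrr1
            · rw [if_neg hsr]; exact hK r
      · -- membership characterisation
        intro r c hgc x
        rw [pv_get?_erase, PySem.Dict.get?_insert] at hgc
        rw [hst' x]
        by_cases hrr2 : r = r2
        · rw [if_pos hrr2] at hgc; exact absurd hgc (by simp)
        · rw [if_neg hrr2] at hgc
          by_cases hrr1 : r = r1
          · rw [if_pos hrr1] at hgc
            obtain rfl : c = PySem.Set.update c1 c2 := by injection hgc with h; exact h.symm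
            subst hrr1
            rw [PySem.Set.mem_update]
            by_cases hx2 : stA.getD x x = r2
            · simp [hmem1, hmem2, hx2]
            · rw [if_neg hx2]; simp [hmem1, hmem2, hx2]
          · rw [if_neg hrr1] at hgc
            have hm := hC r c hgc x
            by_cases hx2 : stA.getD x x = r2
            · rw [if_pos hx2, hm, hx2]
              constructor
              · intro h; exact absurd h.symm hrr2
              · intro h; exact absurd h.symm hrr1
            · rw [if_neg hx2]; exact hm
      · -- bounds
        intro x hx
        rw [hst' x]
        by_cases hx2 : stA.getD x x = r2
        · rw [if_pos hx2]; exact hr1rng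
        · rw [if_neg hx2]; exact hR x hx
      · -- keys stay Nodup
        refine pv_nodup_keys_erase _ _ ?_
        rw [PySem.Dict.keys_insert_of_contains _ _ hcont1]
        exact hnd

theorem pv_init_state (total x : Int) :
    ((PySem.List.pyRange 0 total 1).foldl (fun d i => d.insert i i) PySem.Dict.empty).getD x x = x := by
  exact getD_id_init _ _ (fun x => by simp [PySem.Dict.getD, PySem.Dict.get?, PySem.Dict.empty]) x

theorem pv_init_items (total : Int) :
    ((PySem.List.pyRange 0 total 1).foldl
      (fun d i => d.insert i (PySem.Set.ofList [i])) PySem.Dict.empty).items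
    = (PySem.List.pyRange 0 total 1).map (fun i => (i, PySem.Set.ofList [i])) := by
  have := PySem.Dict.items_foldl_insert_fresh (l := PySem.List.pyRange 0 total 1)
    (k := fun i => i) (v := fun i => PySem.Set.ofList [i]) (d := PySem.Dict.empty)
    (by intro a _; rfl) (by simpa using PySem.List.nodup_pyRange_one 0 total)
  simpa using this

theorem pv_init_keys (total : Int) :
    ((PySem.List.pyRange 0 total 1).foldl
      (fun d i => d.insert i (PySem.Set.ofList [i])) PySem.Dict.empty).keys
    = PySem.List.pyRange 0 total 1 := by
  rw [PySem.Dict.keys, pv_init_items, List.map_map]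
  exact List.map_id _

theorem pv_init_inv (total : Int) :
    PvInv ((PySem.List.pyRange 0 total 1).foldl (fun d i => d.insert i i) PySem.Dict.empty)
      ((PySem.List.pyRange 0 total 1).foldl
        (fun d i => d.insert i (PySem.Set.ofList [i])) PySem.Dict.empty)
      ((PySem.List.pyRange 0 total 1).foldl (fun d i => d.insert i i) PySem.Dict.empty)
      total 0 := by
  have hnd : ((PySem.List.pyRange 0 total 1).foldl
      (fun d i => d.insert i (PySem.Set.ofList [i])) PySem.Dict.empty).keys.Nodup := by
    rw [pv_init_keys]; exact PySem.List.nodup_pyRange_one 0 total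
  refine ⟨?_, ?_, ?_, ?_⟩
  · intro x
    rw [pv_init_state]
    exact ⟨0, le_refl 0, PvReach.refl x (pv_init_state total x)⟩
  · intro r
    rw [PySem.Dict.contains_iff_mem_keys, pv_init_keys, PySem.List.mem_pyRange_one,
      pv_init_state]
    simp
  · intro r c hgc x
    rw [PySem.Dict.get?_eq_some_iff_mem_items _ _ _ hnd, pv_init_items, List.mem_map] at hgc
    obtain ⟨i, hi, he⟩ := hgc
    cases he
    rw [pv_init_state]
    simp [PySem.Set.mem_ofList]
  · intro x hx
    rw [pv_init_state]; exact hx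

-- ===== VERDICT (by name: the statement is the Claim_ definition above) =====
theorem connect_pairs_spec : Claim_equal_connect_pairs := by
  intro pairs total _ hpre
  unfold Spec_connect_pairs connect_pairs connect_pairs_alt
  refine congrArg PySem.Dict.items ?_
  exact pv_loop total (pairs.length + 1) pairs _ _ _ 0 (pv_init_inv total)
    (by rw [pv_init_keys]; exact PySem.List.nodup_pyRange_one 0 total)
    (by omega) (fun p hp => hpre p hp)
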